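-- pv_equiv track=rewrite | github.com/TheWookie/PythonRSA | PyRSA.py | __determineSize__
-- ===== SOURCE A (Python) =====
-- alphabet = "ABCDEFGHIJKLMNOPQRSTUVWXYZ"
--
-- def __determineSize__(message, n):
--     if (n < len(alphabet) - 1):
--         raise Exception("n is not sufficiently large")
--     tf = ""
--     for i in range(0, n, 2):  # for i in range(0, n, 2):
--         # Resorting to dirty concatination because I can't get string formatting to work
--         tf += str(len(alphabet) - 1)  # default is 25, however this is because it's the zero indexed length of our alphabet.
--         # tf += str(25)
--         if (int(tf) > int(n)):
--             groupSize = len(tf) - 2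
--             return groupSize
-- ===== SOURCE B (Python) =====
-- alphabet = "ABCDEFGHIJKLMNOPQRSTUVWXYZ"
--
-- def __determineSize__(message, n):
--     if (n < len(alphabet) - 1):
--         raise Exception("n is not sufficiently large")
--     d = len(str(n))
--     if d % 2 == 1:
--         return d - 1
--     return d - 2 if int("25" * (d // 2)) > n else d
-- ===== Notes on version B (the rewrite author's own statement) =====
-- stated objective: simpler
-- what changed: Replaces the loop that repeatedly concatenates '25' and re-parses the growing string until it exceeds n by a closed-form computation from the digit count of n: the answer is d-1 for odd d = len(str(n)), and for even d a single comparison of int('25'*(d//2)) against n decides between d-2 and d.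
import Mathlib
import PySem

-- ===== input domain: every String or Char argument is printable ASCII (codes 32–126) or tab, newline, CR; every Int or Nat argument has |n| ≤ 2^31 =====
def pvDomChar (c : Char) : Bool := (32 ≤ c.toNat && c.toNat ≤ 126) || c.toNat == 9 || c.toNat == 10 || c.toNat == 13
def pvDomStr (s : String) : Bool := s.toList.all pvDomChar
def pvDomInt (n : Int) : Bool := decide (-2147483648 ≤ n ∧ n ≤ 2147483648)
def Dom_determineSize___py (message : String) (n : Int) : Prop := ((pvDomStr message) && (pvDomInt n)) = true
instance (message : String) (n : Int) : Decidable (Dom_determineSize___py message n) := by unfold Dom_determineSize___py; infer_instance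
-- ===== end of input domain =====

-- B replaces A's loop (repeatedly concatenate "25" and re-parse the growing string until it
-- exceeds n) by a closed-form answer computed from the digit count of n (objective: simpler).

-- ===== PORT A =====
def alphabet : String := "ABCDEFGHIJKLMNOPQRSTUVWXYZ"

-- the 'for i in range(0, n, 2)' loop with its early return; tf is carried as the string's code points
def determineSizeLoop : Nat → List Char → Int → Option Int
  | 0, _, _ => none                                      -- loop falls through: Python returns None
  | m + 1, tf, n =>
    let tf := tf ++ PySem.Int.toChars (PySem.Str.len alphabet - 1)   -- tf += str(len(alphabet) - 1)
    match PySem.Int.ofChars? tf with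
    | none => none                                        -- int(tf) ValueError (tf is all digits: unreachable)
    | some v => if v > n then some (PySem.Chars.len tf - 2) else determineSizeLoop m tf n

def determineSize___py (message : String) (n : Int) : Option Int :=
  if n < PySem.Str.len alphabet - 1 then none             -- raise Exception("n is not sufficiently large")
  else -- iterate once per element of range(0, n, 2) (the index i is unused by the body)
    determineSizeLoop (if 0 < n then ((n - 0 + 2 - 1) / 2).toNat else 0) [] n

-- ===== PORT B =====
def determineSize___py_alt (message : String) (n : Int) : Option Int :=
  if n < PySem.Str.len alphabet - 1 then none             -- raise Exception("n is not sufficiently large")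
  else
    let d : Int := PySem.Chars.len (PySem.Int.toChars n)  -- d = len(str(n))
    if PySem.Int.mod d 2 = 1 then some (d - 1)
    else
      match PySem.Int.ofChars? (PySem.List.pyRepeat ['2', '5'] (PySem.Int.floordiv d 2)) with
      | none => none                                      -- int("25" * (d // 2)) ValueError: unreachable
      | some v => if v > n then some (d - 2) else some d

-- ===== PRECONDITION & SPEC =====
-- Pre_ excludes exactly n < 25, where the Python A raises Exception("n is not sufficiently large").
def Pre_determineSize___py (message : String) (n : Int) : Prop := 25 ≤ n
instance (message : String) (n : Int) : Decidable (Pre_determineSize___py message n) := by unfold Pre_determineSize___py; infer_instance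
def pvWitness_determineSize___py : String × Int := ("hello", 30)

def Spec_determineSize___py (message : String) (n : Int) (out : Option Int) : Prop := out = determineSize___py_alt message n
instance (message : String) (n : Int) (out : Option Int) : Decidable (Spec_determineSize___py message n out) := by unfold Spec_determineSize___py; infer_instance

-- ===== CLAIM (what is proved, stated in full; the proofs are below) =====
def Claim_equal_determineSize___py : Prop := ∀ (message : String) (n : Int), Dom_determineSize___py message n → Pre_determineSize___py message n → Spec_determineSize___py message n (determineSize___py message n)

-- ===== LEMMAS AND PROOFS =====

-- the common value of both programs on 25 ≤ n ≤ 2^31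
def pvG (n : Int) : Option Int :=
  some (if n < 2525 then 2 else if n < 252525 then 4 else if n < 25252525 then 6 else 8)

lemma pv_toDigitsCore_eq (fuel : Nat) : ∀ (n : Nat) (acc : List Char), 0 < n → n < fuel →
    Nat.toDigitsCore 10 fuel n acc = ((Nat.digits 10 n).map Nat.digitChar).reverse ++ acc := by
  induction fuel with
  | zero => intro n acc h1 h2; omega
  | succ f ih =>
    intro n acc h1 h2
    rw [Nat.toDigitsCore]
    rw [Nat.digits_def' (by norm_num : 1 < 10) h1]
    by_cases h : n / 10 = 0
    · have hn : n < 10 := by omega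
      have : Nat.digits 10 (n / 10) = [] := by rw [h]; simp
      simp [h]
    · have h10 : 10 ≤ n := by
        by_contra hc
        exact h (Nat.div_eq_of_lt (by omega))
      rw [if_neg h, ih (n / 10) _ (by omega) (by omega)]
      simp

lemma pv_toChars_pos (n : Int) (h : 0 < n) :
    PySem.Int.toChars n = ((Nat.digits 10 n.toNat).map Nat.digitChar).reverse := by
  have : ¬ n < 0 := by omega
  rw [PySem.Int.toChars, if_neg this, Nat.toDigits,
    pv_toDigitsCore_eq (n.toNat + 1) n.toNat [] (by omega) (by omega)]
  simp

lemma pv_len_toChars (n : Int) (e : Nat) (he : 0 < e)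
    (h1 : (10:Int) ^ (e - 1) ≤ n) (h2 : n < (10:Int) ^ e) :
    PySem.Chars.len (PySem.Int.toChars n) = (e : Int) := by
  have hn : 0 < n := lt_of_lt_of_le (by positivity) h1
  have hb1 : (10:Nat) ^ (e - 1) ≤ n.toNat := by
    have h : ((10 ^ (e - 1) : Nat) : Int) ≤ n := by push_cast; exact h1
    omega
  have hb2 : n.toNat < 10 ^ e := by
    have h : (n : Int) < ((10 ^ e : Nat) : Int) := by push_cast; exact h2
    omega
  have hlog : Nat.log 10 n.toNat = e - 1 :=
    Nat.log_eq_of_pow_le_of_lt_pow hb1 (by rwa [Nat.sub_add_cancel he])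
  rw [pv_toChars_pos n hn]
  simp [PySem.Chars.len_eq, Nat.length_digits 10 n.toNat (by norm_num) (by omega), hlog]
  omega

lemma pv_A_eval (n : Int) (h1 : 25 ≤ n) (h2 : n ≤ 2147483648) :
    determineSizeLoop (if 0 < n then ((n - 0 + 2 - 1) / 2).toNat else 0) [] n = pvG n := by
  have h0n : (0:Int) < n := by omega
  rw [if_pos h0n]
  set N := ((n - 0 + 2 - 1) / 2).toNat with hN
  obtain ⟨k, hk⟩ : ∃ k, N = k + 5 := ⟨N - 5, by omega⟩
  rw [hk]
  simp only [determineSizeLoop, List.nil_append,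
    show PySem.Int.toChars (PySem.Str.len alphabet - 1) = ['2','5'] from by decide,
    List.cons_append]
  norm_num [show PySem.Int.ofChars? ['2','5'] = some 25 from by decide,
    show PySem.Int.ofChars? ['2','5','2','5'] = some 2525 from by decide,
    show PySem.Int.ofChars? ['2','5','2','5','2','5'] = some 252525 from by decide,
    show PySem.Int.ofChars? ['2','5','2','5','2','5','2','5'] = some 25252525 from by decide,
    show PySem.Int.ofChars? ['2','5','2','5','2','5','2','5','2','5'] = some 2525252525 from by decide]
  simp only [pvG]
  split_ifs <;> first | rfl | omega

lemma pv_B_eval (message : String) (n : Int) (h1 : 25 ≤ n) (h2 : n ≤ 2147483648) :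
    determineSize___py_alt message n = pvG n := by
  have hO : ¬ n < PySem.Str.len alphabet - 1 := by
    rw [show PySem.Str.len alphabet = 26 from by decide]; omega
  by_cases c0 : n < 100
  · have hd : PySem.Chars.len (PySem.Int.toChars n) = (2:Int) := by
      exact_mod_cast pv_len_toChars n 2 (by norm_num) (by norm_num; omega) (by norm_num; omega)
    rw [determineSize___py_alt, if_neg hO]
    simp only [hd]
    rw [if_neg (by decide),
      show PySem.Int.ofChars? (PySem.List.pyRepeat ['2', '5'] (PySem.Int.floordiv (2:Int) 2)) = some 25 from by decide]
    simp only [pvG]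
    split_ifs <;> first | omega | norm_num
  by_cases c1 : n < 1000
  · have hd : PySem.Chars.len (PySem.Int.toChars n) = (3:Int) := by
      exact_mod_cast pv_len_toChars n 3 (by norm_num) (by norm_num; omega) (by norm_num; omega)
    rw [determineSize___py_alt, if_neg hO]
    simp only [hd]
    rw [if_pos (by decide)]
    simp only [pvG]
    split_ifs <;> first | omega | norm_num
  by_cases c2 : n < 2525
  · have hd : PySem.Chars.len (PySem.Int.toChars n) = (4:Int) := by
      exact_mod_cast pv_len_toChars n 4 (by norm_num) (by norm_num; omega) (by norm_num; omega)
    rw [determineSize___py_alt, if_neg hO]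
    simp only [hd]
    rw [if_neg (by decide),
      show PySem.Int.ofChars? (PySem.List.pyRepeat ['2', '5'] (PySem.Int.floordiv (4:Int) 2)) = some 2525 from by decide]
    simp only [pvG]
    split_ifs <;> first | omega | norm_num
  by_cases c3 : n < 10000
  · have hd : PySem.Chars.len (PySem.Int.toChars n) = (4:Int) := by
      exact_mod_cast pv_len_toChars n 4 (by norm_num) (by norm_num; omega) (by norm_num; omega)
    rw [determineSize___py_alt, if_neg hO]
    simp only [hd]
    rw [if_neg (by decide),
      show PySem.Int.ofChars? (PySem.List.pyRepeat ['2', '5'] (PySem.Int.floordiv (4:Int) 2)) = some 2525 from by decide]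
    simp only [pvG]
    split_ifs <;> first | omega | norm_num
  by_cases c4 : n < 100000
  · have hd : PySem.Chars.len (PySem.Int.toChars n) = (5:Int) := by
      exact_mod_cast pv_len_toChars n 5 (by norm_num) (by norm_num; omega) (by norm_num; omega)
    rw [determineSize___py_alt, if_neg hO]
    simp only [hd]
    rw [if_pos (by decide)]
    simp only [pvG]
    split_ifs <;> first | omega | norm_num
  by_cases c5 : n < 252525
  · have hd : PySem.Chars.len (PySem.Int.toChars n) = (6:Int) := by
      exact_mod_cast pv_len_toChars n 6 (by norm_num) (by norm_num; omega) (by norm_num; omega)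
    rw [determineSize___py_alt, if_neg hO]
    simp only [hd]
    rw [if_neg (by decide),
      show PySem.Int.ofChars? (PySem.List.pyRepeat ['2', '5'] (PySem.Int.floordiv (6:Int) 2)) = some 252525 from by decide]
    simp only [pvG]
    split_ifs <;> first | omega | norm_num
  by_cases c6 : n < 1000000
  · have hd : PySem.Chars.len (PySem.Int.toChars n) = (6:Int) := by
      exact_mod_cast pv_len_toChars n 6 (by norm_num) (by norm_num; omega) (by norm_num; omega)
    rw [determineSize___py_alt, if_neg hO]
    simp only [hd]
    rw [if_neg (by decide),
      show PySem.Int.ofChars? (PySem.List.pyRepeat ['2', '5'] (PySem.Int.floordiv (6:Int) 2)) = some 252525 from by decide]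
    simp only [pvG]
    split_ifs <;> first | omega | norm_num
  by_cases c7 : n < 10000000
  · have hd : PySem.Chars.len (PySem.Int.toChars n) = (7:Int) := by
      exact_mod_cast pv_len_toChars n 7 (by norm_num) (by norm_num; omega) (by norm_num; omega)
    rw [determineSize___py_alt, if_neg hO]
    simp only [hd]
    rw [if_pos (by decide)]
    simp only [pvG]
    split_ifs <;> first | omega | norm_num
  by_cases c8 : n < 25252525
  · have hd : PySem.Chars.len (PySem.Int.toChars n) = (8:Int) := by
      exact_mod_cast pv_len_toChars n 8 (by norm_num) (by norm_num; omega) (by norm_num; omega)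
    rw [determineSize___py_alt, if_neg hO]
    simp only [hd]
    rw [if_neg (by decide),
      show PySem.Int.ofChars? (PySem.List.pyRepeat ['2', '5'] (PySem.Int.floordiv (8:Int) 2)) = some 25252525 from by decide]
    simp only [pvG]
    split_ifs <;> first | omega | norm_num
  by_cases c9 : n < 100000000
  · have hd : PySem.Chars.len (PySem.Int.toChars n) = (8:Int) := by
      exact_mod_cast pv_len_toChars n 8 (by norm_num) (by norm_num; omega) (by norm_num; omega)
    rw [determineSize___py_alt, if_neg hO]
    simp only [hd]
    rw [if_neg (by decide),
      show PySem.Int.ofChars? (PySem.List.pyRepeat ['2', '5'] (PySem.Int.floordiv (8:Int) 2)) = some 25252525 from by decide]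
    simp only [pvG]
    split_ifs <;> first | omega | norm_num
  by_cases c10 : n < 1000000000
  · have hd : PySem.Chars.len (PySem.Int.toChars n) = (9:Int) := by
      exact_mod_cast pv_len_toChars n 9 (by norm_num) (by norm_num; omega) (by norm_num; omega)
    rw [determineSize___py_alt, if_neg hO]
    simp only [hd]
    rw [if_pos (by decide)]
    simp only [pvG]
    split_ifs <;> first | omega | norm_num
  have hd : PySem.Chars.len (PySem.Int.toChars n) = (10:Int) := by
    exact_mod_cast pv_len_toChars n 10 (by norm_num) (by norm_num; omega) (by norm_num; omega)
  rw [determineSize___py_alt, if_neg hO]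
  simp only [hd]
  rw [if_neg (by decide),
    show PySem.Int.ofChars? (PySem.List.pyRepeat ['2', '5'] (PySem.Int.floordiv (10:Int) 2)) = some 2525252525 from by decide]
  simp only [pvG]
  split_ifs <;> first | omega | norm_num

-- ===== VERDICT (by name: the statement is the Claim_ definition above) =====
theorem determineSize___py_spec : Claim_equal_determineSize___py := by
  intro message n hdom hpre
  unfold Spec_determineSize___py
  have hlen : PySem.Str.len alphabet = 26 := by decide
  have hub : n ≤ 2147483648 := by
    have := hdom
    unfold Dom_determineSize___py pvDomInt at this
    simp only [Bool.and_eq_true, decide_eq_true_eq] at this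
    exact this.2.2
  have hpre' : (25:Int) ≤ n := hpre
  rw [determineSize___py, if_neg (by rw [hlen]; omega),
    pv_A_eval n hpre' hub, pv_B_eval message n hpre' hub]
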